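-- pv_equiv track=rewrite | github.com/Sangioo/Ingegneria-Infomatica | Introduzione-alla-programmazione/Dispense/LabPython05/A_Ex5.py | A_Ex5
-- ===== SOURCE A (Python) =====
-- def A_Ex5(n):
--     if n<2: return 'ERRORE'
--
--     ris = ''
--     for i in range(n):
--         for j in range(n):
--             if (i+j)%2==0:
--                 ris += ' '
--             else:
--                 ris += '*'
--         ris += '\n'
--
--     return ris
-- ===== SOURCE B (Python) =====
-- def A_Ex5(n):
--     if n < 2: return 'ERRORE'
--     even = (' *' * n)[:n]
--     odd = ('* ' * n)[:n]
--     rows = [even if i % 2 == 0 else odd for i in range(n)]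
--     return '\n'.join(rows) + '\n'
-- ===== Notes on version B (the rewrite author's own statement) =====
-- stated objective: faster
-- what changed: Replaces the per-cell nested loop (one parity test and one string concatenation per cell) by precomputing the two possible row strings via pattern repetition and slicing, then joining row choices with newlines.
import Mathlib
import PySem

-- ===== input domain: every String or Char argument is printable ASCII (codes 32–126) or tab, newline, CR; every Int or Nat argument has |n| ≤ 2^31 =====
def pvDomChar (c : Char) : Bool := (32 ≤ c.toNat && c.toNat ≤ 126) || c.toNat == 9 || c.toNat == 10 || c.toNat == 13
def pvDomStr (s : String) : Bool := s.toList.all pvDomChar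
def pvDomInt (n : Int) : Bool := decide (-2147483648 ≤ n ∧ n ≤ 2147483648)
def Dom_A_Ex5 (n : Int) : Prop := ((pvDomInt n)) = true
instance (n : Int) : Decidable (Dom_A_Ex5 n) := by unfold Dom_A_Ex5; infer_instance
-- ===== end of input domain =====

-- B builds each row from a precomputed repeated pattern slice and joins the rows, instead of A's per-cell nested loop.

-- ===== PORT A =====
def A_Ex5 (n : Int) : String :=
  if n < 2 then "ERRORE"
  else
    String.ofList ((PySem.List.pyRange 0 n).foldl (fun ris i =>
      ((PySem.List.pyRange 0 n).foldl (fun ris j =>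
        ris ++ [if PySem.Int.mod (i + j) 2 = 0 then ' ' else '*']) ris) ++ ['\n']) [])

-- ===== PORT B =====
def A_Ex5_alt (n : Int) : String :=
  if n < 2 then "ERRORE"
  else
    let even := PySem.List.slice (List.flatten (List.replicate n.toNat [' ', '*'])) none (some n)
    let odd := PySem.List.slice (List.flatten (List.replicate n.toNat ['*', ' '])) none (some n)
    let rows := (PySem.List.pyRange 0 n).map (fun i => if PySem.Int.mod i 2 = 0 then even else odd)
    String.ofList (PySem.Chars.join ['\n'] rows ++ ['\n'])

-- ===== PRECONDITION & SPEC =====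
def Spec_A_Ex5 (n : Int) (out : String) : Prop := out = A_Ex5_alt n
instance (n : Int) (out : String) : Decidable (Spec_A_Ex5 n out) := by unfold Spec_A_Ex5; infer_instance

-- ===== CLAIM (what is proved, stated in full; the proofs are below) =====
def Claim_equal_A_Ex5 : Prop := ∀ (n : Int), Dom_A_Ex5 n → Spec_A_Ex5 n (A_Ex5 n)

-- ===== LEMMAS AND PROOFS =====

-- the repeated two-character pattern, element by element
lemma pat_eq (a b : Char) (m : Nat) :
    List.flatten (List.replicate m [a, b]) =
      (List.range (2 * m)).map (fun l => if l % 2 = 0 then a else b) := by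
  induction m with
  | zero => simp
  | succ m ih =>
    have h2 : 2 * (m + 1) = (2 * m + 1) + 1 := by ring
    rw [h2, List.range_succ_eq_map, List.range_succ_eq_map]
    simp only [List.replicate_succ, List.flatten_cons, ih, List.map_cons, List.map_map,
      List.cons_append, List.nil_append]
    norm_num
    intro l _
    have h3 : (l + 1 + 1) % 2 = l % 2 := by omega
    simp [h3]

-- row k of the board as a prefix of the repeated pattern
lemma row_eq (m k : Nat) :
    (List.range m).map (fun l => if (k + l) % 2 = 0 then ' ' else '*') =
      List.take m (List.flatten (List.replicate m
        (if k % 2 = 0 then [' ', '*'] else ['*', ' ']))) := by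
  by_cases hk : k % 2 = 0
  · rw [if_pos hk, pat_eq, ← List.map_take, List.take_range,
      Nat.min_eq_left (by omega : m ≤ 2 * m)]
    apply List.map_congr_left
    intro l _
    have h : (k + l) % 2 = l % 2 := by omega
    rw [h]
  · rw [if_neg hk, pat_eq, ← List.map_take, List.take_range,
      Nat.min_eq_left (by omega : m ≤ 2 * m)]
    apply List.map_congr_left
    intro l _
    by_cases hl : l % 2 = 0
    · have h : (k + l) % 2 = 1 := by omega
      simp [h, hl]
    · have h : (k + l) % 2 = 0 := by omega
      simp [h, hl]

-- '\n'.join(rows) + '\n' concatenates each row followed by a newline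
lemma join_newline (c : Char) (x : List Char) (xs : List (List Char)) :
    PySem.Chars.join [c] (x :: xs) ++ [c] = (x :: xs).flatMap (· ++ [c]) := by
  induction xs generalizing x with
  | nil => simp [PySem.Chars.join_singleton]
  | cons y ys ih =>
    rw [PySem.Chars.join_cons_cons, List.append_assoc, List.append_assoc, ih y]
    simp [List.flatMap_cons, List.append_assoc]

-- ===== VERDICT (by name: the statement is the Claim_ definition above) =====
theorem A_Ex5_spec : Claim_equal_A_Ex5 := by
  intro n _
  unfold Spec_A_Ex5 A_Ex5 A_Ex5_alt
  by_cases hlt : n < 2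
  · rw [if_pos hlt, if_pos hlt]
  · rw [if_neg hlt, if_neg hlt]
    obtain ⟨m, hm, hm2⟩ : ∃ m : Nat, n = (m : Int) ∧ 2 ≤ m := ⟨n.toNat, by omega, by omega⟩
    subst hm
    congr 1
    rw [PySem.List.pyRange_zero_natCast, Int.toNat_natCast,
      PySem.List.slice_to_natCast, PySem.List.slice_to_natCast]
    -- A side: turn the nested folds into a flatMap of rows
    have hA : ∀ init : List Char,
        (List.map (fun k : Nat => (k : Int)) (List.range m)).foldl (fun ris i =>
          ((List.map (fun k : Nat => (k : Int)) (List.range m)).foldl (fun ris j =>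
            ris ++ [if PySem.Int.mod (i + j) 2 = 0 then ' ' else '*']) ris) ++ ['\n']) init
        = init ++ (List.range m).flatMap (fun k =>
            (List.range m).map (fun l => if (k + l) % 2 = 0 then ' ' else '*') ++ ['\n']) := by
      intro init
      rw [show (fun (ris : List Char) (i : Int) =>
            ((List.map (fun k : Nat => (k : Int)) (List.range m)).foldl (fun ris j =>
              ris ++ [if PySem.Int.mod (i + j) 2 = 0 then ' ' else '*']) ris) ++ ['\n'])
          = (fun ris i => ris ++ ((List.map (fun k : Nat => (k : Int)) (List.range m)).map
              (fun j => if PySem.Int.mod (i + j) 2 = 0 then ' ' else '*') ++ ['\n'])) from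
        (by funext ris i; rw [PySem.List.foldl_append_singleton_eq_map]; simp [List.append_assoc])]
      rw [PySem.List.foldl_append_eq_flatMap]
      congr 1
      rw [List.flatMap_map]
      apply List.flatMap_congr
      intro k _
      congr 1
      rw [List.map_map]
      apply List.map_congr_left
      intro l _
      simp only [Function.comp]
      have hc : (k : Int) + (l : Int) = ((k + l : Nat) : Int) := by push_cast; ring
      rw [hc, show ((2 : Int)) = ((2 : Nat) : Int) from rfl, PySem.Int.mod_natCast]
      by_cases hp : (k + l) % 2 = 0
      · rw [if_pos (Nat.cast_eq_zero.mpr hp), if_pos hp]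
      · rw [if_neg (fun h => hp (Nat.cast_eq_zero.mp h)), if_neg hp]
    rw [hA []]
    -- B side: each chosen row is exactly the k-th board row
    rw [List.map_map]
    have hB : (List.range m).map
        ((fun i : Int => if PySem.Int.mod i 2 = 0
            then List.take m (List.flatten (List.replicate m [' ', '*']))
            else List.take m (List.flatten (List.replicate m ['*', ' ']))) ∘ (fun k : Nat => (k : Int)))
        = (List.range m).map (fun k =>
            (List.range m).map (fun l => if (k + l) % 2 = 0 then ' ' else '*')) := by
      apply List.map_congr_left
      intro k _
      simp only [Function.comp]
      rw [show ((2 : Int)) = ((2 : Nat) : Int) from rfl, PySem.Int.mod_natCast, row_eq m k]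
      by_cases hk : k % 2 = 0
      · rw [if_pos (show ((k % 2 : Nat) : Int) = 0 by simp only [Nat.cast_eq_zero]; exact hk),
          if_pos hk]
      · rw [if_neg (show ¬ ((k % 2 : Nat) : Int) = 0 by simp only [Nat.cast_eq_zero]; exact hk),
          if_neg hk]
    rw [hB]
    -- rows are nonempty, so join + '\n' is the flatMap of rows with trailing newlines
    have hne : (List.range m).map (fun k =>
        (List.range m).map (fun l => if (k + l) % 2 = 0 then ' ' else '*')) ≠ [] := by
      simp [List.range_eq_nil]; omega
    obtain ⟨x, xs, hx⟩ := List.exists_cons_of_ne_nil hne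
    rw [List.nil_append, hx, join_newline, ← hx, List.flatMap_map]
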